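-- pv_equiv track=rewrite | github.com/superhac/vpinplay | app/tables_plus_cache.py | _normalize_vps_ids
-- ===== SOURCE A (Python) =====
-- def _normalize_vps_ids(vps_ids: list[str] | None) -> list[str] | None:
--     if vps_ids is None:
--         return None
--     unique_ids = sorted(
--         {
--             str(vps_id).strip()
--             for vps_id in vps_ids
--             if vps_id is not None and str(vps_id).strip()
--         }
--     )
--     return unique_ids
-- ===== SOURCE B (Python) =====
-- def _insert_unique(sorted_ids, s):
--     # scan for s's position in an already sorted, duplicate-free list, then splice it in
--     i = 0
--     n = len(sorted_ids)
--     while i < n and sorted_ids[i] < s: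
--         i += 1
--     if i < n and sorted_ids[i] == s:
--         return sorted_ids
--     return sorted_ids[:i] + [s] + sorted_ids[i:]
--
--
-- def _normalize_vps_ids(vps_ids):
--     if vps_ids is None:
--         return None
--     result = []
--     for vps_id in vps_ids:
--         if vps_id is None:
--             continue
--         s = str(vps_id).strip()
--         if s:
--             result = _insert_unique(result, s)
--     return result
-- ===== Notes on version B (the rewrite author's own statement) =====
-- stated objective: alternative
-- what changed: Replaces the hash-set comprehension followed by sorted() with incremental ordered insertion: the result is kept as a sorted duplicate-free list at every step and each normalized id is inserted in place (or skipped if already present) by a recursive positional insert — no sort call and no set are used.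
import Mathlib
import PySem

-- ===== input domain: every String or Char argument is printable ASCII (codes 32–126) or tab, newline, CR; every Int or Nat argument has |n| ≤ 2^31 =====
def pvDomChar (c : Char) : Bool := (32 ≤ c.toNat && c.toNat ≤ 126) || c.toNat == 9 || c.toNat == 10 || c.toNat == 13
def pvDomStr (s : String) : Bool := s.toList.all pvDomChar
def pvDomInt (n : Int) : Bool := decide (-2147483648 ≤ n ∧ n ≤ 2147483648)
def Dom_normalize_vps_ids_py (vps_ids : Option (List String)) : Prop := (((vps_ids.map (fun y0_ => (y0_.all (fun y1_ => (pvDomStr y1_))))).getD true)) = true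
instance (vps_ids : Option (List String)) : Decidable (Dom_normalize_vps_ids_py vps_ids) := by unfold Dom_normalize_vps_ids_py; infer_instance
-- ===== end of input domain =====

-- B replaces A's hash-set + sorted() with incremental ordered insertion into a kept-sorted unique list (alternative algorithm, same values).


-- ===== PORT A =====
def normalize_vps_ids_py (vps_ids : Option (List String)) : Option (List String) :=
  match vps_ids with
  | none => none
  | some xs =>
    -- set comprehension: fold Set.add over the stripped, nonempty ids
    let uniq : PySem.Set String :=
      xs.foldl (fun s x =>
        let t := PySem.Str.strip x
        if t ≠ "" then PySem.Set.add s t else s) PySem.Set.empty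
    some (PySem.List.sorted uniq (fun x => x) false)

-- ===== PORT B =====
-- Source B's _insert_unique: scan for the position (the while loop), then check and splice
def pvScanPos : List String → String → Nat
  | [], _ => 0
  | h :: t, s => if h < s then pvScanPos t s + 1 else 0

def pvInsertUnique (l : List String) (s : String) : List String :=
  let i := pvScanPos l s
  if (l.drop i).head? = some s then l
  else l.take i ++ s :: l.drop i

def normalize_vps_ids_py_alt (vps_ids : Option (List String)) : Option (List String) :=
  match vps_ids with
  | none => none
  | some xs =>
    some (xs.foldl (fun acc x =>
      let t := PySem.Str.strip x
      if t ≠ "" then pvInsertUnique acc t else acc) [])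

-- ===== PRECONDITION & SPEC =====
def Spec_normalize_vps_ids_py (vps_ids : Option (List String)) (out : Option (List String)) : Prop := out = normalize_vps_ids_py_alt vps_ids
instance (vps_ids : Option (List String)) (out : Option (List String)) : Decidable (Spec_normalize_vps_ids_py vps_ids out) := by unfold Spec_normalize_vps_ids_py; infer_instance

-- ===== CLAIM (what is proved, stated in full; the proofs are below) =====
def Claim_equal_normalize_vps_ids_py : Prop := ∀ (vps_ids : Option (List String)), Dom_normalize_vps_ids_py vps_ids → Spec_normalize_vps_ids_py vps_ids (normalize_vps_ids_py vps_ids)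

-- ===== LEMMAS AND PROOFS =====

-- A's set-comprehension fold is Set.add folded over the stripped nonempty ids
theorem pvFoldA (xs : List String) (s : PySem.Set String) :
    xs.foldl (fun s x =>
      let t := PySem.Str.strip x
      if t ≠ "" then PySem.Set.add s t else s) s
    = ((xs.filter (fun x => decide (PySem.Str.strip x ≠ ""))).map PySem.Str.strip).foldl PySem.Set.add s := by
  induction xs generalizing s with
  | nil => rfl
  | cons x xs ih =>
    by_cases h : PySem.Str.strip x = ""
    · simpa [h] using ih s
    · simpa [h] using ih (PySem.Set.add s (PySem.Str.strip x))

-- B's fold is pvInsertUnique folded over the same stripped nonempty ids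
theorem pvFoldB (xs : List String) (acc : List String) :
    xs.foldl (fun acc x =>
      let t := PySem.Str.strip x
      if t ≠ "" then pvInsertUnique acc t else acc) acc
    = ((xs.filter (fun x => decide (PySem.Str.strip x ≠ ""))).map PySem.Str.strip).foldl pvInsertUnique acc := by
  induction xs generalizing acc with
  | nil => rfl
  | cons x xs ih =>
    by_cases h : PySem.Str.strip x = ""
    · simpa [h] using ih acc
    · simpa [h] using ih (pvInsertUnique acc (PySem.Str.strip x))

-- proof-only structural form of the scan-and-splice insert
def pvInsertRec : List String → String → List String
  | [], s => [s]
  | h :: t, s =>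
    if h < s then h :: pvInsertRec t s
    else if h = s then h :: t
    else s :: h :: t

theorem pvInsertUnique_eq_rec (l : List String) (s : String) :
    pvInsertUnique l s = pvInsertRec l s := by
  induction l with
  | nil => rfl
  | cons h t ih =>
    unfold pvInsertUnique pvInsertRec
    by_cases h1 : h < s
    · simp only [pvScanPos, if_pos h1, List.drop_succ_cons, List.take_succ_cons]
      rw [← ih]; unfold pvInsertUnique
      split_ifs <;> simp_all
    · simp [pvScanPos, h1]

theorem pvMem_insertUnique (l : List String) (s z : String) :
    z ∈ pvInsertRec l s ↔ z = s ∨ z ∈ l := by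
  induction l with
  | nil => simp [pvInsertRec]
  | cons h t ih =>
    rw [pvInsertRec]
    split_ifs with h1 h2
    · simp [ih]; tauto
    · subst h2; simp
    · simp

theorem pvPairwise_insertUnique (l : List String) (s : String)
    (hl : l.Pairwise (· < ·)) : (pvInsertRec l s).Pairwise (· < ·) := by
  induction l with
  | nil => simp [pvInsertRec]
  | cons h t ih =>
    have hht : ∀ z ∈ t, h < z := fun z hz => List.rel_of_pairwise_cons hl hz
    rw [pvInsertRec]
    split_ifs with h1 h2
    · refine List.pairwise_cons.mpr ⟨?_, ih hl.tail⟩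
      intro z hz
      rcases (pvMem_insertUnique t s z).mp hz with rfl | hz
      · exact h1
      · exact hht z hz
    · subst h2; exact hl
    · have hsh : s < h := lt_of_le_of_ne (le_of_not_gt h1) (fun e => h2 e.symm)
      refine List.pairwise_cons.mpr ⟨?_, hl⟩
      intro z hz
      rcases List.mem_cons.mp hz with rfl | hz
      · exact hsh
      · exact hsh.trans (hht z hz)

-- folding pvInsertUnique keeps the list strictly sorted and its members = acc ∪ elements
theorem pvFold_insertUnique_spec (l : List String) (acc : List String)
    (hacc : acc.Pairwise (· < ·)) :
    (l.foldl pvInsertUnique acc).Pairwise (· < ·) ∧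
    (∀ z, z ∈ l.foldl pvInsertUnique acc ↔ z ∈ acc ∨ z ∈ l) := by
  induction l generalizing acc with
  | nil => exact ⟨hacc, fun z => by simp⟩
  | cons x t ih =>
    rw [List.foldl_cons, pvInsertUnique_eq_rec]
    obtain ⟨h1, h2⟩ := ih (pvInsertRec acc x) (pvPairwise_insertUnique acc x hacc)
    refine ⟨h1, fun z => ?_⟩
    rw [h2 z, pvMem_insertUnique]
    simp; tauto

-- core fact: sorting the set of l equals the incremental-insertion fold over l
theorem pvSortedSet_eq_insertFold (l : List String) :
    PySem.List.sorted (PySem.Set.ofList l) (fun x => x) false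
    = l.foldl pvInsertUnique [] := by
  obtain ⟨hlt, hmem⟩ := pvFold_insertUnique_spec l [] (by simp)
  apply PySem.List.sorted_eq_of_perm_of_pairwise_lt
  · apply (List.perm_ext_iff_of_nodup ?_ ?_).mpr
    · intro z
      rw [hmem z]
      simp [PySem.Set.mem_ofList]
    · exact hlt.imp (fun h => ne_of_lt h)
    · exact PySem.Set.nodup_ofList l
  · exact hlt

-- ===== VERDICT (by name: the statement is the Claim_ definition above) =====
theorem normalize_vps_ids_py_spec : Claim_equal_normalize_vps_ids_py := by
  intro vps_ids _
  unfold Spec_normalize_vps_ids_py normalize_vps_ids_py normalize_vps_ids_py_alt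
  cases vps_ids with
  | none => rfl
  | some xs =>
    simp only [pvFoldA, pvFoldB]
    have h : List.foldl PySem.Set.add PySem.Set.empty
        (List.map PySem.Str.strip (List.filter (fun x => decide (PySem.Str.strip x ≠ "")) xs))
        = PySem.Set.ofList (List.map PySem.Str.strip (List.filter (fun x => decide (PySem.Str.strip x ≠ "")) xs)) :=
      (PySem.Set.ofList_eq_foldl _).symm
    rw [h, pvSortedSet_eq_insertFold]
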